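-- pv_equiv track=rewrite | github.com/ThomasTrepanier/log6307-final-project | data/interim/stackoverflow/src/python/21_46.py | find_welfare_crook
-- ===== SOURCE A (Python) =====
-- def find_welfare_crook(f, g, h, i, j, k):
--     """f, g, and h are "ascending functions," i.e.,
-- i <= j implies f[i] <= f[j] or, equivalently,
-- f[i] < f[j] implies i < j, and the same goes for g and h.
-- i, j, k define where to start the search in each list.
-- """
--     # This is an implementation of a solution to the Welfare Crook
--     # problems presented in David Gries's book, The Science of Programming.
--     # The surprising and beautiful thing is that the guard predicates are
--     # so few and so simple.
--     i , j , k = i , j , k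
--     while True:
--         if f[i] < g[j]:
--             i += 1
--         elif g[j] < h[k]:
--             j += 1
--         elif h[k] < f[i]:
--             k += 1
--         else:
--             break
--     return (i,j,k)
-- ===== SOURCE B (Python) =====
-- def find_welfare_crook(f, g, h, i, j, k):
--     """f, g, h are ascending lists; i, j, k are start indices.
--     Leapfrog-join reformulation: maintain a candidate value `target`;
--     each round, gallop every pointer forward to the first element that
--     reaches `target`, raising `target` whenever a pointer lands strictly
--     above it; stop once all three pointers sit exactly on `target`."""
--     target = f[i]
--     while True:
--         while f[i] < target:
--             i += 1
--         if f[i] > target: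
--             target = f[i]
--         while g[j] < target:
--             j += 1
--         if g[j] > target:
--             target = g[j]
--         while h[k] < target:
--             k += 1
--         if h[k] > target:
--             target = h[k]
--         if f[i] == target and g[j] == target:
--             return (i, j, k)
-- ===== Notes on version B (the rewrite author's own statement) =====
-- stated objective: alternative
-- what changed: Replaces Gries's guard ladder (one three-way value comparison advancing one pointer by one step per iteration) with a leapfrog join: an explicit candidate value `target` is maintained, each round every pointer gallops in an inner loop to the first element reaching `target`, and `target` is raised to whatever value the pointer lands on, until all three pointers sit on `target`.
import Mathlib
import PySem

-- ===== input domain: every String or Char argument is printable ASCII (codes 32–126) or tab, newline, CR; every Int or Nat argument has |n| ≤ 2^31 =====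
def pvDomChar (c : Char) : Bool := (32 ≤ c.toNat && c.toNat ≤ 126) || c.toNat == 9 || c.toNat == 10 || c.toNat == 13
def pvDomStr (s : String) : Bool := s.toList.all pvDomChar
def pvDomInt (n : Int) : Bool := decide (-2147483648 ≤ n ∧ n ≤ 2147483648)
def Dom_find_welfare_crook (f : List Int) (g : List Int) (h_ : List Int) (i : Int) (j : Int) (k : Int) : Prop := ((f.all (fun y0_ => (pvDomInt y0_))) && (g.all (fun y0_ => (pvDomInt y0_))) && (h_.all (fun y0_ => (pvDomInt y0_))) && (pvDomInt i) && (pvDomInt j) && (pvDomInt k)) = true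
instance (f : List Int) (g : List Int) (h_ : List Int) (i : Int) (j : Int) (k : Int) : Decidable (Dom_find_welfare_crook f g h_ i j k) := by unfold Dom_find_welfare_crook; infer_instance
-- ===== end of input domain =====

-- B replaces Gries's guard ladder by a leapfrog join (a maintained candidate
-- value with inner gallop loops); equality of the RETURN value is claimed on
-- Pre_, a closed-form condition under which Python A returns normally.

-- ===== PORT A =====
-- Gries's while-True guard ladder, one fuel unit per iteration.  A `none`
-- lookup is Python's IndexError; there and on fuel exhaustion the current
-- (i, j, k) is returned (Python A returns no value on such inputs).
def wcLoop (f : List Int) (g : List Int) (h_ : List Int) : Nat → Int → Int → Int → Int × Int × Int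
  | 0, i, j, k => (i, j, k)
  | n+1, i, j, k =>
    match PySem.List.pyGet? f i, PySem.List.pyGet? g j, PySem.List.pyGet? h_ k with
    | some a, some b, some c =>
      if a < b then wcLoop f g h_ n (i+1) j k
      else if b < c then wcLoop f g h_ n i (j+1) k
      else if c < a then wcLoop f g h_ n i j (k+1)
      else (i, j, k)
    | _, _, _ => (i, j, k)

def find_welfare_crook (f : List Int) (g : List Int) (h_ : List Int) (i : Int) (j : Int) (k : Int) : Int × Int × Int :=
  wcLoop f g h_ (2 * (f.length + g.length + h_.length) + 2) i j k

-- ===== PORT B =====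
-- Source B's inner gallop loop 'while xs[p] < target: p += 1'; a `none` lookup is
-- Python's IndexError (current index returned, such runs are outside Pre_).
def wcAdv (xs : List Int) (t : Int) : Nat → Int → Int
  | 0, i => i
  | n+1, i =>
    match PySem.List.pyGet? xs i with
    | some a => if a < t then wcAdv xs t n (i+1) else i
    | none => i

-- Source B's outer while-True loop, one fuel unit per round: gallop each pointer
-- to `target`, raise `target` to the landed value, return when all sit on it.
def wcRounds (f : List Int) (g : List Int) (h_ : List Int) : Nat → Int → Int → Int → Int → Int × Int × Int
  | 0, i, j, k, _ => (i, j, k)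
  | n+1, i, j, k, t =>
    let i' := wcAdv f t (2 * f.length + 2) i
    let t1 := match PySem.List.pyGet? f i' with
              | some a => if t < a then a else t
              | none => t
    let j' := wcAdv g t1 (2 * g.length + 2) j
    let t2 := match PySem.List.pyGet? g j' with
              | some b => if t1 < b then b else t1
              | none => t1
    let k' := wcAdv h_ t2 (2 * h_.length + 2) k
    let t3 := match PySem.List.pyGet? h_ k' with
              | some c => if t2 < c then c else t2
              | none => t2
    match PySem.List.pyGet? f i', PySem.List.pyGet? g j' with
    | some a, some b => if a = t3 ∧ b = t3 then (i', j', k') else wcRounds f g h_ n i' j' k' t3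
    | _, _ => (i', j', k')

def find_welfare_crook_alt (f : List Int) (g : List Int) (h_ : List Int) (i : Int) (j : Int) (k : Int) : Int × Int × Int :=
  match PySem.List.pyGet? f i with
  | some t => wcRounds f g h_ (4 * (f.length + g.length + h_.length) + 4) i j k t
  | none => (i, j, k)

-- ===== PRECONDITION & SPEC =====
-- Pre_ keeps the inputs on which Python A provably returns: some value v is
-- readable at positions x ≥ i, y ≥ j, z ≥ k of the three lists and every
-- element between each start index and that position is ≤ v, so no scan can
-- run past v (indices are Python indices: negative ones count from the end).
def Pre_find_welfare_crook (f : List Int) (g : List Int) (h_ : List Int) (i : Int) (j : Int) (k : Int) : Prop :=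
  -(f.length : Int) ≤ i ∧ -(g.length : Int) ≤ j ∧ -(h_.length : Int) ≤ k ∧
  ∃ x ∈ PySem.List.pyRange i f.length 1, ∃ y ∈ PySem.List.pyRange j g.length 1,
    ∃ z ∈ PySem.List.pyRange k h_.length 1, ∃ v ∈ f,
      PySem.List.pyGet? f x = some v ∧ PySem.List.pyGet? g y = some v ∧
      PySem.List.pyGet? h_ z = some v ∧
      (∀ p ∈ PySem.List.pyRange i (x+1) 1, ((PySem.List.pyGet? f p).all (fun w => decide (w ≤ v))) = true) ∧
      (∀ p ∈ PySem.List.pyRange j (y+1) 1, ((PySem.List.pyGet? g p).all (fun w => decide (w ≤ v))) = true) ∧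
      (∀ p ∈ PySem.List.pyRange k (z+1) 1, ((PySem.List.pyGet? h_ p).all (fun w => decide (w ≤ v))) = true)

instance (f : List Int) (g : List Int) (h_ : List Int) (i : Int) (j : Int) (k : Int) : Decidable (Pre_find_welfare_crook f g h_ i j k) := by unfold Pre_find_welfare_crook; infer_instance

def pvWitness_find_welfare_crook : List Int × List Int × List Int × Int × Int × Int :=
  ([1, 2], [0, 2], [2, 3], 0, 0, 0)

def Spec_find_welfare_crook (f : List Int) (g : List Int) (h_ : List Int) (i : Int) (j : Int) (k : Int) (out : Int × Int × Int) : Prop := out = find_welfare_crook_alt f g h_ i j k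
instance (f : List Int) (g : List Int) (h_ : List Int) (i : Int) (j : Int) (k : Int) (out : Int × Int × Int) : Decidable (Spec_find_welfare_crook f g h_ i j k out) := by unfold Spec_find_welfare_crook; infer_instance

-- ===== CLAIM (what is proved, stated in full; the proofs are below) =====
def Claim_equal_find_welfare_crook : Prop := ∀ (f : List Int) (g : List Int) (h_ : List Int) (i : Int) (j : Int) (k : Int), Dom_find_welfare_crook f g h_ i j k → Pre_find_welfare_crook f g h_ i j k → Spec_find_welfare_crook f g h_ i j k (find_welfare_crook f g h_ i j k)

-- ===== LEMMAS AND PROOFS =====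

-- Both loops are strategies of one rewriting system on pointer triples:
-- advance any pointer whose current value is strictly below another current
-- value.  The system has the diamond property, so a terminal state (all three
-- values equal) reachable at all is reached by EVERY maximal strategy —
-- A's cyclic ladder and B's leapfrog rounds in particular.

-- the three current values, `none` when any lookup raises
def wcVals (f : List Int) (g : List Int) (h_ : List Int) (s : Int × Int × Int) : Option (Int × Int × Int) :=
  match PySem.List.pyGet? f s.1, PySem.List.pyGet? g s.2.1, PySem.List.pyGet? h_ s.2.2 with
  | some a, some b, some c => some (a, b, c)
  | _, _, _ => none

-- one step: advance a pointer dominated by another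
def wcGstep (f : List Int) (g : List Int) (h_ : List Int) (s s' : Int × Int × Int) : Prop :=
  ∃ a b c, wcVals f g h_ s = some (a, b, c) ∧
    (((a < b ∨ a < c) ∧ s' = (s.1 + 1, s.2.1, s.2.2)) ∨
     ((b < c ∨ b < a) ∧ s' = (s.1, s.2.1 + 1, s.2.2)) ∨
     ((c < a ∨ c < b) ∧ s' = (s.1, s.2.1, s.2.2 + 1)))

def wcGseq (f : List Int) (g : List Int) (h_ : List Int) : Nat → (Int × Int × Int) → (Int × Int × Int) → Prop
  | 0, s, t => s = t
  | n+1, s, t => ∃ s', wcGstep f g h_ s s' ∧ wcGseq f g h_ n s' t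

def wcTerm (f : List Int) (g : List Int) (h_ : List Int) (s : Int × Int × Int) : Prop :=
  ∃ a, wcVals f g h_ s = some (a, a, a)

theorem wcVals_eq (f g h_ : List Int) (s : Int × Int × Int) (a b c : Int) :
    wcVals f g h_ s = some (a, b, c) ↔
      (PySem.List.pyGet? f s.1 = some a ∧ PySem.List.pyGet? g s.2.1 = some b ∧
        PySem.List.pyGet? h_ s.2.2 = some c) := by
  unfold wcVals
  rcases hf : PySem.List.pyGet? f s.1 with _ | a0 <;>
    rcases hg : PySem.List.pyGet? g s.2.1 with _ | b0 <;>
      rcases hh : PySem.List.pyGet? h_ s.2.2 with _ | c0 <;> simp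

theorem wcTerm_no_step (f g h_ : List Int) (s s' : Int × Int × Int)
    (ht : wcTerm f g h_ s) (hs : wcGstep f g h_ s s') : False := by
  obtain ⟨v, hv⟩ := ht
  obtain ⟨a, b, c, hv', hcase⟩ := hs
  rw [hv] at hv'
  obtain ⟨rfl, rfl, rfl⟩ : v = a ∧ v = b ∧ v = c := by
    simpa [Prod.ext_iff] using Option.some.inj hv'
  rcases hcase with ⟨hg, _⟩ | ⟨hg, _⟩ | ⟨hg, _⟩ <;> omega

theorem wcGseq_of_term (f g h_ : List Int) (n : Nat) (s t : Int × Int × Int)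
    (ht : wcTerm f g h_ s) (hs : wcGseq f g h_ n s t) : n = 0 ∧ s = t := by
  cases n with
  | zero => exact ⟨rfl, hs⟩
  | succ m =>
    obtain ⟨s', hstep, _⟩ := hs
    exact absurd hstep (fun h => wcTerm_no_step f g h_ s s' ht h)

theorem wcGseq_vals (f g h_ : List Int) (n : Nat) (s t : Int × Int × Int)
    (hs : wcGseq f g h_ n s t) (ht : wcTerm f g h_ t) :
    ∃ a b c, wcVals f g h_ s = some (a, b, c) := by
  cases n with
  | zero => obtain ⟨v, hv⟩ := hs ▸ ht; exact ⟨v, v, v, hv⟩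
  | succ m =>
    obtain ⟨s', hstep, _⟩ := hs
    obtain ⟨a, b, c, hv, _⟩ := hstep
    exact ⟨a, b, c, hv⟩

-- Diamond transport: one arbitrary step off a terminating sequence still
-- reaches the same terminal, one step sooner.
theorem wcG_transport (f g h_ : List Int) :
    ∀ (n : Nat) (s s' t : Int × Int × Int), wcGseq f g h_ n s t → wcTerm f g h_ t →
      wcGstep f g h_ s s' → ∃ m, n = m + 1 ∧ wcGseq f g h_ m s' t := by
  intro n
  induction n with
  | zero =>
    intro s s' t hseq hterm hstep
    exact absurd hstep (fun h => wcTerm_no_step f g h_ s s' (hseq ▸ hterm) h)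
  | succ n ih =>
    intro s s' t hseq hterm hstep
    obtain ⟨s1, hstep1, hrest⟩ := hseq
    by_cases heq : s' = s1
    · exact ⟨n, rfl, heq ▸ hrest⟩
    · obtain ⟨a, b, c, hv, hc1⟩ := hstep1
      obtain ⟨a2, b2, c2, hv2, hc2⟩ := hstep
      rw [hv] at hv2
      obtain ⟨rfl, rfl, rfl⟩ : a = a2 ∧ b = b2 ∧ c = c2 := by
        simpa [Prod.ext_iff] using Option.some.inj hv2
      obtain ⟨av, bv, cv⟩ := (wcVals_eq f g h_ s a b c).mp hv
      -- values at s1 (needed to step off s1)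
      obtain ⟨a1, b1, c1, hv1⟩ := wcGseq_vals f g h_ n s1 t hrest hterm
      obtain ⟨av1, bv1, cv1⟩ := (wcVals_eq f g h_ s1 a1 b1 c1).mp hv1
      -- the six off-diagonal pairs
      rcases hc1 with ⟨hg1, he1⟩ | ⟨hg1, he1⟩ | ⟨hg1, he1⟩ <;>
        rcases hc2 with ⟨hg2, he2⟩ | ⟨hg2, he2⟩ | ⟨hg2, he2⟩
      all_goals (first | (exact absurd (he2.trans he1.symm) heq) | skip)
      -- case f then g
      · subst he1 he2
        have hbc : b < c := by omega
        have hstep1u : wcGstep f g h_ (s.1+1, s.2.1, s.2.2) (s.1+1, s.2.1+1, s.2.2) :=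
          ⟨a1, b1, c1, hv1, Or.inr (Or.inl ⟨by
            have eb : b1 = b := by rw [bv1] at bv; exact Option.some.inj bv
            have ec : c1 = c := by rw [cv1] at cv; exact Option.some.inj cv
            omega, rfl⟩)⟩
        obtain ⟨m, hm, hsequ⟩ := ih _ _ t hrest hterm hstep1u
        obtain ⟨au, bu, cu, hvu⟩ := wcGseq_vals f g h_ m _ t hsequ hterm
        obtain ⟨avu, bvu, cvu⟩ := (wcVals_eq f g h_ _ au bu cu).mp hvu
        have hvs' : wcVals f g h_ (s.1, s.2.1+1, s.2.2) = some (a, bu, c) :=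
          (wcVals_eq f g h_ _ a bu c).mpr ⟨av, bvu, cv⟩
        have hac : a < c := by omega
        refine ⟨m+1, by omega, ⟨(s.1+1, s.2.1+1, s.2.2),
          ⟨a, bu, c, hvs', Or.inl ⟨Or.inr hac, rfl⟩⟩, hsequ⟩⟩
      -- case f then h
      · subst he1 he2
        have hcb : c < b := by omega
        have hstep1u : wcGstep f g h_ (s.1+1, s.2.1, s.2.2) (s.1+1, s.2.1, s.2.2+1) :=
          ⟨a1, b1, c1, hv1, Or.inr (Or.inr ⟨by
            have eb : b1 = b := by rw [bv1] at bv; exact Option.some.inj bv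
            have ec : c1 = c := by rw [cv1] at cv; exact Option.some.inj cv
            omega, rfl⟩)⟩
        obtain ⟨m, hm, hsequ⟩ := ih _ _ t hrest hterm hstep1u
        obtain ⟨au, bu, cu, hvu⟩ := wcGseq_vals f g h_ m _ t hsequ hterm
        obtain ⟨avu, bvu, cvu⟩ := (wcVals_eq f g h_ _ au bu cu).mp hvu
        have hvs' : wcVals f g h_ (s.1, s.2.1, s.2.2+1) = some (a, b, cu) :=
          (wcVals_eq f g h_ _ a b cu).mpr ⟨av, bv, cvu⟩
        have hab : a < b := by omega
        refine ⟨m+1, by omega, ⟨(s.1+1, s.2.1, s.2.2+1),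
          ⟨a, b, cu, hvs', Or.inl ⟨Or.inl hab, rfl⟩⟩, hsequ⟩⟩
      -- case g then f
      · subst he1 he2
        have hac : a < c := by omega
        have hstep1u : wcGstep f g h_ (s.1, s.2.1+1, s.2.2) (s.1+1, s.2.1+1, s.2.2) :=
          ⟨a1, b1, c1, hv1, Or.inl ⟨by
            have ea : a1 = a := by rw [av1] at av; exact Option.some.inj av
            have ec : c1 = c := by rw [cv1] at cv; exact Option.some.inj cv
            omega, rfl⟩⟩
        obtain ⟨m, hm, hsequ⟩ := ih _ _ t hrest hterm hstep1u
        obtain ⟨au, bu, cu, hvu⟩ := wcGseq_vals f g h_ m _ t hsequ hterm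
        obtain ⟨avu, bvu, cvu⟩ := (wcVals_eq f g h_ _ au bu cu).mp hvu
        have hvs' : wcVals f g h_ (s.1+1, s.2.1, s.2.2) = some (au, b, c) :=
          (wcVals_eq f g h_ _ au b c).mpr ⟨avu, bv, cv⟩
        have hbc : b < c := by omega
        refine ⟨m+1, by omega, ⟨(s.1+1, s.2.1+1, s.2.2),
          ⟨au, b, c, hvs', Or.inr (Or.inl ⟨Or.inl hbc, rfl⟩)⟩, hsequ⟩⟩
      -- case g then h
      · subst he1 he2
        have hstep1u : wcGstep f g h_ (s.1, s.2.1+1, s.2.2) (s.1, s.2.1+1, s.2.2+1) :=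
          ⟨a1, b1, c1, hv1, Or.inr (Or.inr ⟨by
            have ea : a1 = a := by rw [av1] at av; exact Option.some.inj av
            have ec : c1 = c := by rw [cv1] at cv; exact Option.some.inj cv
            omega, rfl⟩)⟩
        obtain ⟨m, hm, hsequ⟩ := ih _ _ t hrest hterm hstep1u
        obtain ⟨au, bu, cu, hvu⟩ := wcGseq_vals f g h_ m _ t hsequ hterm
        obtain ⟨avu, bvu, cvu⟩ := (wcVals_eq f g h_ _ au bu cu).mp hvu
        have hvs' : wcVals f g h_ (s.1, s.2.1, s.2.2+1) = some (a, b, cu) :=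
          (wcVals_eq f g h_ _ a b cu).mpr ⟨av, bv, cvu⟩
        have hba : b < a := by omega
        refine ⟨m+1, by omega, ⟨(s.1, s.2.1+1, s.2.2+1),
          ⟨a, b, cu, hvs', Or.inr (Or.inl ⟨Or.inr hba, rfl⟩)⟩, hsequ⟩⟩
      -- case h then f
      · subst he1 he2
        have hab : a < b := by omega
        have hstep1u : wcGstep f g h_ (s.1, s.2.1, s.2.2+1) (s.1+1, s.2.1, s.2.2+1) :=
          ⟨a1, b1, c1, hv1, Or.inl ⟨by
            have ea : a1 = a := by rw [av1] at av; exact Option.some.inj av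
            have eb : b1 = b := by rw [bv1] at bv; exact Option.some.inj bv
            omega, rfl⟩⟩
        obtain ⟨m, hm, hsequ⟩ := ih _ _ t hrest hterm hstep1u
        obtain ⟨au, bu, cu, hvu⟩ := wcGseq_vals f g h_ m _ t hsequ hterm
        obtain ⟨avu, bvu, cvu⟩ := (wcVals_eq f g h_ _ au bu cu).mp hvu
        have hvs' : wcVals f g h_ (s.1+1, s.2.1, s.2.2) = some (au, b, c) :=
          (wcVals_eq f g h_ _ au b c).mpr ⟨avu, bv, cv⟩
        have hcb : c < b := by omega
        refine ⟨m+1, by omega, ⟨(s.1+1, s.2.1, s.2.2+1),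
          ⟨au, b, c, hvs', Or.inr (Or.inr ⟨Or.inr hcb, rfl⟩)⟩, hsequ⟩⟩
      -- case h then g
      · subst he1 he2
        have hba : b < a := by omega
        have hstep1u : wcGstep f g h_ (s.1, s.2.1, s.2.2+1) (s.1, s.2.1+1, s.2.2+1) :=
          ⟨a1, b1, c1, hv1, Or.inr (Or.inl ⟨by
            have ea : a1 = a := by rw [av1] at av; exact Option.some.inj av
            have eb : b1 = b := by rw [bv1] at bv; exact Option.some.inj bv
            omega, rfl⟩)⟩
        obtain ⟨m, hm, hsequ⟩ := ih _ _ t hrest hterm hstep1u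
        obtain ⟨au, bu, cu, hvu⟩ := wcGseq_vals f g h_ m _ t hsequ hterm
        obtain ⟨avu, bvu, cvu⟩ := (wcVals_eq f g h_ _ au bu cu).mp hvu
        have hvs' : wcVals f g h_ (s.1, s.2.1+1, s.2.2) = some (a, bu, c) :=
          (wcVals_eq f g h_ _ a bu c).mpr ⟨av, bvu, cv⟩
        have hca : c < a := by omega
        refine ⟨m+1, by omega, ⟨(s.1, s.2.1+1, s.2.2+1),
          ⟨a, bu, c, hvs', Or.inr (Or.inr ⟨Or.inl hca, rfl⟩)⟩, hsequ⟩⟩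

-- a successful lookup pins the index range
theorem wc_get_range (xs : List Int) (i w : Int) (h : PySem.List.pyGet? xs i = some w) :
    -(xs.length : Int) ≤ i ∧ i < xs.length := by
  by_contra hc
  have : ¬ PySem.Raise.InRange xs.length i := by
    unfold PySem.Raise.InRange; omega
  rw [← PySem.List.pyGet?_eq_none_iff] at this
  simp [h] at this

theorem wc_get_some (xs : List Int) (i : Int) (h1 : -(xs.length : Int) ≤ i)
    (h2 : i < xs.length) : ∃ w, PySem.List.pyGet? xs i = some w := by
  cases he : PySem.List.pyGet? xs i with
  | some w => exact ⟨w, rfl⟩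
  | none =>
    rw [PySem.List.pyGet?_eq_none_iff] at he
    exact absurd (by unfold PySem.Raise.InRange; omega) he

-- A's ladder follows the terminating sequence to its terminal.
theorem wcLoop_reaches (f g h_ : List Int) :
    ∀ (m n : Nat) (i j k : Int) (t : Int × Int × Int), wcGseq f g h_ n (i, j, k) t →
      wcTerm f g h_ t → n < m → wcLoop f g h_ m i j k = t := by
  intro m
  induction m with
  | zero => intro n i j k t _ _ h; omega
  | succ m ih =>
    intro n i j k t hseq hterm hn
    obtain ⟨a, b, c, hv⟩ := wcGseq_vals f g h_ n _ t hseq hterm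
    obtain ⟨ha, hb, hc⟩ := (wcVals_eq f g h_ _ a b c).mp hv
    simp only at ha hb hc
    simp only [wcLoop, ha, hb, hc]
    by_cases h1 : a < b
    · rw [if_pos h1]
      obtain ⟨m', hm', hseq'⟩ := wcG_transport f g h_ n _ _ t hseq hterm
        ⟨a, b, c, hv, Or.inl ⟨Or.inl h1, rfl⟩⟩
      exact ih m' (i+1) j k t hseq' hterm (by omega)
    · rw [if_neg h1]
      by_cases h2 : b < c
      · rw [if_pos h2]
        obtain ⟨m', hm', hseq'⟩ := wcG_transport f g h_ n _ _ t hseq hterm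
          ⟨a, b, c, hv, Or.inr (Or.inl ⟨Or.inl h2, rfl⟩)⟩
        exact ih m' i (j+1) k t hseq' hterm (by omega)
      · rw [if_neg h2]
        by_cases h3 : c < a
        · rw [if_pos h3]
          obtain ⟨m', hm', hseq'⟩ := wcG_transport f g h_ n _ _ t hseq hterm
            ⟨a, b, c, hv, Or.inr (Or.inr ⟨Or.inl h3, rfl⟩)⟩
          exact ih m' i j (k+1) t hseq' hterm (by omega)
        · rw [if_neg h3]
          have hterm' : wcTerm f g h_ (i, j, k) := ⟨a, by
            rw [hv]
            have hba : b = a := by omega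
            have hca : c = a := by omega
            rw [hba, hca]⟩
          obtain ⟨_, he⟩ := wcGseq_of_term f g h_ n _ t hterm' hseq
          exact he

-- B's f-gallop follows the sequence: every advance is a dominated step.
theorem wcAdv_f_reaches (f g h_ : List Int) :
    ∀ (m n : Nat) (i j k t : Int) (T : Int × Int × Int),
    wcGseq f g h_ n (i, j, k) T → wcTerm f g h_ T →
    ((∃ b, PySem.List.pyGet? g j = some b ∧ t ≤ b) ∨
      (∃ c, PySem.List.pyGet? h_ k = some c ∧ t ≤ c)) →
    ((f.length : Int) - i).toNat < m →
    ∃ (i' : Int) (n' : Nat), wcAdv f t m i = i' ∧ wcGseq f g h_ n' (i', j, k) T ∧ n' ≤ n ∧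
      (∃ a', PySem.List.pyGet? f i' = some a' ∧ t ≤ a') ∧
      (∀ a0, PySem.List.pyGet? f i = some a0 → a0 < t → n' < n) := by
  intro m
  induction m with
  | zero =>
    intro n i j k t T hseq hterm _ hm
    obtain ⟨a, b, c, hv⟩ := wcGseq_vals f g h_ n _ T hseq hterm
    obtain ⟨ha, _, _⟩ := (wcVals_eq f g h_ _ a b c).mp hv
    have := wc_get_range f i a ha
    omega
  | succ m ih =>
    intro n i j k t T hseq hterm hside hm
    obtain ⟨a, b, c, hv⟩ := wcGseq_vals f g h_ n _ T hseq hterm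
    obtain ⟨ha, hb, hc⟩ := (wcVals_eq f g h_ _ a b c).mp hv
    simp only at ha hb hc
    by_cases hlt : a < t
    · have hguard : a < b ∨ a < c := by
        rcases hside with ⟨b0, hb0, htb⟩ | ⟨c0, hc0, htc⟩
        · left; rw [hb] at hb0; have := Option.some.inj hb0; omega
        · right; rw [hc] at hc0; have := Option.some.inj hc0; omega
      obtain ⟨m', hm', hseq'⟩ := wcG_transport f g h_ n _ _ T hseq hterm
        ⟨a, b, c, hv, Or.inl ⟨hguard, rfl⟩⟩
      have hrange := wc_get_range f i a ha
      obtain ⟨i', n', he, hseq'', hn', hval, _⟩ :=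
        ih m' (i+1) j k t T hseq' hterm hside (by omega)
      refine ⟨i', n', ?_, hseq'', by omega, hval, fun _ _ _ => by omega⟩
      simp only [wcAdv, ha]
      rw [if_pos hlt]
      exact he
    · refine ⟨i, n, ?_, hseq, le_refl n, ⟨a, ha, by omega⟩, ?_⟩
      · simp only [wcAdv, ha]
        rw [if_neg hlt]
      · intro a0 he0 hl0
        rw [ha] at he0
        have := Option.some.inj he0
        omega

-- B's g-gallop.
theorem wcAdv_g_reaches (f g h_ : List Int) :
    ∀ (m n : Nat) (i j k t : Int) (T : Int × Int × Int),
    wcGseq f g h_ n (i, j, k) T → wcTerm f g h_ T →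
    ((∃ a, PySem.List.pyGet? f i = some a ∧ t ≤ a) ∨
      (∃ c, PySem.List.pyGet? h_ k = some c ∧ t ≤ c)) →
    ((g.length : Int) - j).toNat < m →
    ∃ (j' : Int) (n' : Nat), wcAdv g t m j = j' ∧ wcGseq f g h_ n' (i, j', k) T ∧ n' ≤ n ∧
      (∃ b', PySem.List.pyGet? g j' = some b' ∧ t ≤ b') := by
  intro m
  induction m with
  | zero =>
    intro n i j k t T hseq hterm _ hm
    obtain ⟨a, b, c, hv⟩ := wcGseq_vals f g h_ n _ T hseq hterm
    obtain ⟨_, hb, _⟩ := (wcVals_eq f g h_ _ a b c).mp hv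
    have := wc_get_range g j b hb
    omega
  | succ m ih =>
    intro n i j k t T hseq hterm hside hm
    obtain ⟨a, b, c, hv⟩ := wcGseq_vals f g h_ n _ T hseq hterm
    obtain ⟨ha, hb, hc⟩ := (wcVals_eq f g h_ _ a b c).mp hv
    simp only at ha hb hc
    by_cases hlt : b < t
    · have hguard : b < c ∨ b < a := by
        rcases hside with ⟨a0, ha0, hta⟩ | ⟨c0, hc0, htc⟩
        · right; rw [ha] at ha0; have := Option.some.inj ha0; omega
        · left; rw [hc] at hc0; have := Option.some.inj hc0; omega
      obtain ⟨m', hm', hseq'⟩ := wcG_transport f g h_ n _ _ T hseq hterm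
        ⟨a, b, c, hv, Or.inr (Or.inl ⟨hguard, rfl⟩)⟩
      have hrange := wc_get_range g j b hb
      obtain ⟨j', n', he, hseq'', hn', hval⟩ :=
        ih m' i (j+1) k t T hseq' hterm hside (by omega)
      refine ⟨j', n', ?_, hseq'', by omega, hval⟩
      simp only [wcAdv, hb]
      rw [if_pos hlt]
      exact he
    · refine ⟨j, n, ?_, hseq, le_refl n, ⟨b, hb, by omega⟩⟩
      simp only [wcAdv, hb]
      rw [if_neg hlt]

-- B's h-gallop.
theorem wcAdv_h_reaches (f g h_ : List Int) :
    ∀ (m n : Nat) (i j k t : Int) (T : Int × Int × Int),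
    wcGseq f g h_ n (i, j, k) T → wcTerm f g h_ T →
    ((∃ a, PySem.List.pyGet? f i = some a ∧ t ≤ a) ∨
      (∃ b, PySem.List.pyGet? g j = some b ∧ t ≤ b)) →
    ((h_.length : Int) - k).toNat < m →
    ∃ (k' : Int) (n' : Nat), wcAdv h_ t m k = k' ∧ wcGseq f g h_ n' (i, j, k') T ∧ n' ≤ n ∧
      (∃ c', PySem.List.pyGet? h_ k' = some c' ∧ t ≤ c') := by
  intro m
  induction m with
  | zero =>
    intro n i j k t T hseq hterm _ hm
    obtain ⟨a, b, c, hv⟩ := wcGseq_vals f g h_ n _ T hseq hterm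
    obtain ⟨_, _, hc⟩ := (wcVals_eq f g h_ _ a b c).mp hv
    have := wc_get_range h_ k c hc
    omega
  | succ m ih =>
    intro n i j k t T hseq hterm hside hm
    obtain ⟨a, b, c, hv⟩ := wcGseq_vals f g h_ n _ T hseq hterm
    obtain ⟨ha, hb, hc⟩ := (wcVals_eq f g h_ _ a b c).mp hv
    simp only at ha hb hc
    by_cases hlt : c < t
    · have hguard : c < a ∨ c < b := by
        rcases hside with ⟨a0, ha0, hta⟩ | ⟨b0, hb0, htb⟩
        · left; rw [ha] at ha0; have := Option.some.inj ha0; omega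
        · right; rw [hb] at hb0; have := Option.some.inj hb0; omega
      obtain ⟨m', hm', hseq'⟩ := wcG_transport f g h_ n _ _ T hseq hterm
        ⟨a, b, c, hv, Or.inr (Or.inr ⟨hguard, rfl⟩)⟩
      have hrange := wc_get_range h_ k c hc
      obtain ⟨k', n', he, hseq'', hn', hval⟩ :=
        ih m' i j (k+1) t T hseq' hterm hside (by omega)
      refine ⟨k', n', ?_, hseq'', by omega, hval⟩
      simp only [wcAdv, hc]
      rw [if_pos hlt]
      exact he
    · refine ⟨k, n, ?_, hseq, le_refl n, ⟨c, hc, by omega⟩⟩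
      simp only [wcAdv, hc]
      rw [if_neg hlt]

-- B's leapfrog rounds follow the sequence to the same terminal.
theorem wcRounds_reaches (f g h_ : List Int) :
    ∀ (R n : Nat) (i j k t : Int) (T : Int × Int × Int),
    wcGseq f g h_ n (i, j, k) T → wcTerm f g h_ T →
    ((∃ a, PySem.List.pyGet? f i = some a ∧ t = a) ∨
      (∃ c, PySem.List.pyGet? h_ k = some c ∧ t = c)) →
    (2 * n + 2 ≤ R ∨ (2 * n + 1 ≤ R ∧ ∃ a0, PySem.List.pyGet? f i = some a0 ∧ a0 < t)) →
    wcRounds f g h_ R i j k t = T := by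
  intro R
  induction R with
  | zero => intro n i j k t T _ _ _ hfuel; rcases hfuel with h | ⟨h, _⟩ <;> omega
  | succ R ih =>
    intro n i j k t T hseq hterm hinv hfuel
    obtain ⟨a, b, c, hv⟩ := wcGseq_vals f g h_ n _ T hseq hterm
    obtain ⟨ha, hb, hc⟩ := (wcVals_eq f g h_ _ a b c).mp hv
    simp only at ha hb hc
    -- f-stage
    obtain ⟨i', n1, hadvf, hseq1, hn1, ⟨a', ha', hta'⟩, himpf⟩ :
        ∃ (i' : Int) (n1 : Nat), wcAdv f t (2 * f.length + 2) i = i' ∧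
          wcGseq f g h_ n1 (i', j, k) T ∧ n1 ≤ n ∧
          (∃ a', PySem.List.pyGet? f i' = some a' ∧ t ≤ a') ∧
          (∀ a0, PySem.List.pyGet? f i = some a0 → a0 < t → n1 < n) := by
      rcases hinv with ⟨a0, ha0, hta0⟩ | ⟨c0, hc0, htc0⟩
      · rw [ha] at ha0
        have hta : t = a := by rw [hta0]; exact (Option.some.inj ha0).symm
        refine ⟨i, n, ?_, hseq, le_refl n, ⟨a, ha, by omega⟩, ?_⟩
        · simp only [wcAdv, ha]
          rw [if_neg (by omega : ¬ a < t)]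
        · intro a1 he1 hl1
          rw [ha] at he1
          have := Option.some.inj he1
          omega
      · have hrange := wc_get_range f i a ha
        exact wcAdv_f_reaches f g h_ (2 * f.length + 2) n i j k t T hseq hterm
          (Or.inr ⟨c0, hc0, by omega⟩) (by omega)
    have et1 : (if t < a' then a' else t) = a' := by split <;> omega
    -- g-stage
    have hrangej := wc_get_range g j b hb
    obtain ⟨j', n2, hadvg, hseq2, hn2, ⟨b', hb', htb'⟩⟩ :=
      wcAdv_g_reaches f g h_ (2 * g.length + 2) n1 i' j k a' T hseq1 hterm
        (Or.inl ⟨a', ha', le_refl a'⟩) (by omega)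
    have et2 : (if a' < b' then b' else a') = b' := by split <;> omega
    -- h-stage
    have hrangek := wc_get_range h_ k c hc
    obtain ⟨k', n3, hadvh, hseq3, hn3, ⟨c', hc', htc'⟩⟩ :=
      wcAdv_h_reaches f g h_ (2 * h_.length + 2) n2 i' j' k b' T hseq2 hterm
        (Or.inr ⟨b', hb', le_refl b'⟩) (by omega)
    have et3 : (if b' < c' then c' else b') = c' := by split <;> omega
    have hstep : wcRounds f g h_ (R+1) i j k t =
        (if a' = c' ∧ b' = c' then (i', j', k')
         else wcRounds f g h_ R i' j' k' c') := by
      simp only [wcRounds, hadvf, ha', et1, hadvg, hb', et2, hadvh, hc', et3]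
    by_cases hret : a' = c' ∧ b' = c'
    · have hterm' : wcTerm f g h_ (i', j', k') :=
        ⟨c', (wcVals_eq f g h_ _ c' c' c').mpr ⟨by rw [ha', hret.1], by rw [hb', hret.2], hc'⟩⟩
      obtain ⟨_, he⟩ := wcGseq_of_term f g h_ n3 _ T hterm' hseq3
      rw [hstep, if_pos hret]
      exact he
    · have hlt : a' < c' := by
        rcases lt_or_eq_of_le (le_trans htb' htc') with h | h
        · exact h
        · exact absurd ⟨h, by omega⟩ hret
      have hfuel' : 2 * n3 + 2 ≤ R ∨
          (2 * n3 + 1 ≤ R ∧ ∃ a0, PySem.List.pyGet? f i' = some a0 ∧ a0 < c') := by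
        rcases hfuel with h | ⟨h, a0, he0, hl0⟩
        · right; exact ⟨by omega, ⟨a', ha', hlt⟩⟩
        · left; have := himpf a0 he0 hl0; omega
      rw [hstep, if_neg hret]
      exact ih n3 i' j' k' c' T hseq3 hterm (Or.inr ⟨c', hc', rfl⟩) hfuel'

-- The window condition produces a terminating sequence: no pointer can pass
-- its capped witness position, so the standard measure argument closes.
theorem wc_window_term (f g h_ : List Int) :
    ∀ (μ : Nat) (i j k x y z v : Int),
    i ≤ x → x < f.length → -(f.length : Int) ≤ i →
    j ≤ y → y < g.length → -(g.length : Int) ≤ j →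
    k ≤ z → z < h_.length → -(h_.length : Int) ≤ k →
    PySem.List.pyGet? f x = some v → PySem.List.pyGet? g y = some v →
    PySem.List.pyGet? h_ z = some v →
    (∀ p, i ≤ p → p ≤ x → ∀ w, PySem.List.pyGet? f p = some w → w ≤ v) →
    (∀ p, j ≤ p → p ≤ y → ∀ w, PySem.List.pyGet? g p = some w → w ≤ v) →
    (∀ p, k ≤ p → p ≤ z → ∀ w, PySem.List.pyGet? h_ p = some w → w ≤ v) →
    ((x - i) + (y - j) + (z - k)).toNat ≤ μ →
    ∃ (n : Nat) (T : Int × Int × Int), wcGseq f g h_ n (i, j, k) T ∧ wcTerm f g h_ T ∧ n ≤ μ := by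
  intro μ
  induction μ with
  | zero =>
    intro i j k x y z v hix hx hi hjy hy hj hkz hz hk hgx hgy hgz capf capg caph hm
    have hxi : x = i := by omega
    have hyj : y = j := by omega
    have hzk : z = k := by omega
    refine ⟨0, (i, j, k), rfl, ⟨v, (wcVals_eq f g h_ _ v v v).mpr ⟨?_, ?_, ?_⟩⟩, le_refl 0⟩
    · rw [show (i, j, k).1 = x by rw [hxi]]; exact hgx
    · rw [show (i, j, k).2.1 = y by rw [hyj]]; exact hgy
    · rw [show (i, j, k).2.2 = z by rw [hzk]]; exact hgz
  | succ μ ih =>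
    intro i j k x y z v hix hx hi hjy hy hj hkz hz hk hgx hgy hgz capf capg caph hm
    obtain ⟨a, ha⟩ := wc_get_some f i hi (by omega)
    obtain ⟨b, hb⟩ := wc_get_some g j hj (by omega)
    obtain ⟨c, hc⟩ := wc_get_some h_ k hk (by omega)
    have hav : a ≤ v := capf i (le_refl i) hix a ha
    have hbv : b ≤ v := capg j (le_refl j) hjy b hb
    have hcv : c ≤ v := caph k (le_refl k) hkz c hc
    have hv : wcVals f g h_ (i, j, k) = some (a, b, c) :=
      (wcVals_eq f g h_ _ a b c).mpr ⟨ha, hb, hc⟩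
    by_cases h1 : a < b
    · have hixlt : i < x := by
        rcases lt_or_eq_of_le hix with h | h
        · exact h
        · subst h; rw [hgx] at ha; have := Option.some.inj ha; omega
      obtain ⟨n, T, hseq, hterm, hn⟩ := ih (i+1) j k x y z v (by omega) hx (by omega)
        hjy hy hj hkz hz hk hgx hgy hgz
        (fun p hp1 hp2 w hw => capf p (by omega) hp2 w hw) capg caph (by omega)
      exact ⟨n+1, T, ⟨(i+1, j, k), ⟨a, b, c, hv, Or.inl ⟨Or.inl h1, rfl⟩⟩, hseq⟩, hterm, by omega⟩
    · by_cases h2 : b < c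
      · have hjylt : j < y := by
          rcases lt_or_eq_of_le hjy with h | h
          · exact h
          · subst h; rw [hgy] at hb; have := Option.some.inj hb; omega
        obtain ⟨n, T, hseq, hterm, hn⟩ := ih i (j+1) k x y z v hix hx hi (by omega)
          hy (by omega) hkz hz hk hgx hgy hgz capf
          (fun p hp1 hp2 w hw => capg p (by omega) hp2 w hw) caph (by omega)
        exact ⟨n+1, T, ⟨(i, j+1, k), ⟨a, b, c, hv, Or.inr (Or.inl ⟨Or.inl h2, rfl⟩)⟩, hseq⟩,
          hterm, by omega⟩
      · by_cases h3 : c < a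
        · have hkzlt : k < z := by
            rcases lt_or_eq_of_le hkz with h | h
            · exact h
            · subst h; rw [hgz] at hc; have := Option.some.inj hc; omega
          obtain ⟨n, T, hseq, hterm, hn⟩ := ih i j (k+1) x y z v hix hx hi hjy hy hj
            (by omega) hz (by omega) hgx hgy hgz capf capg
            (fun p hp1 hp2 w hw => caph p (by omega) hp2 w hw) (by omega)
          exact ⟨n+1, T, ⟨(i, j, k+1), ⟨a, b, c, hv, Or.inr (Or.inr ⟨Or.inl h3, rfl⟩)⟩, hseq⟩,
            hterm, by omega⟩
        · refine ⟨0, (i, j, k), rfl, ⟨a, ?_⟩, by omega⟩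
          rw [hv]
          have hba : b = a := by omega
          have hca : c = a := by omega
          rw [hba, hca]

-- ===== VERDICT (by name: the statement is the Claim_ definition above) =====
theorem find_welfare_crook_spec : Claim_equal_find_welfare_crook := by
  intro f g h_ i j k _ hpre
  unfold Spec_find_welfare_crook find_welfare_crook find_welfare_crook_alt
  obtain ⟨hi, hj, hk, x, hxm, y, hym, z, hzm, v, _, hgx, hgy, hgz, capf, capg, caph⟩ := hpre
  rw [PySem.List.mem_pyRange_one] at hxm hym hzm
  have capf' : ∀ p, i ≤ p → p ≤ x → ∀ w, PySem.List.pyGet? f p = some w → w ≤ v := by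
    intro p h1 h2 w hw
    have := capf p (PySem.List.mem_pyRange_one.mpr ⟨h1, by omega⟩)
    rw [hw] at this
    simpa using this
  have capg' : ∀ p, j ≤ p → p ≤ y → ∀ w, PySem.List.pyGet? g p = some w → w ≤ v := by
    intro p h1 h2 w hw
    have := capg p (PySem.List.mem_pyRange_one.mpr ⟨h1, by omega⟩)
    rw [hw] at this
    simpa using this
  have caph' : ∀ p, k ≤ p → p ≤ z → ∀ w, PySem.List.pyGet? h_ p = some w → w ≤ v := by
    intro p h1 h2 w hw
    have := caph p (PySem.List.mem_pyRange_one.mpr ⟨h1, by omega⟩)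
    rw [hw] at this
    simpa using this
  obtain ⟨n, T, hseq, hterm, hn⟩ := wc_window_term f g h_
    ((x - i) + (y - j) + (z - k)).toNat i j k x y z v hxm.1 hxm.2 hi hym.1 hym.2 hj
    hzm.1 hzm.2 hk hgx hgy hgz capf' capg' caph' (le_refl _)
  have hnS : n ≤ 2 * (f.length + g.length + h_.length) := by omega
  obtain ⟨a, b, c, hv⟩ := wcGseq_vals f g h_ n _ T hseq hterm
  obtain ⟨ha, _, _⟩ := (wcVals_eq f g h_ _ a b c).mp hv
  simp only at ha
  rw [wcLoop_reaches f g h_ (2 * (f.length + g.length + h_.length) + 2) n i j k T hseq hterm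
    (by omega), ha]
  exact (wcRounds_reaches f g h_ (4 * (f.length + g.length + h_.length) + 4) n i j k a T hseq
    hterm (Or.inl ⟨a, ha, rfl⟩) (Or.inl (by omega))).symm
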